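-- pv_equiv track=rewrite | github.com/CodieKev/Simulation_of_a_Quantum-Photonic_Processor | UnityOf3Channel_15_12.py | replication
-- ===== SOURCE A (Python) =====
-- from itertools import product,permutations
--
-- def replication(se):
--     if len(se) - len(set(se)) !=0:
--         temp = list(permutations(list(range(len(se)))))
--         temp1 = []
--         for i in range(len(temp)):
--             temp2 = []
--             for j in range(len(temp[i])):
--                 temp2.append(se[temp[i][j]])
--             if temp2 == se:
--                 temp1.append(temp[i])
--     else:
--         temp1 = [se]
--     return(temp1)
-- ===== SOURCE B (Python) =====
-- def replication(se):
--     n = len(se)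
--     if len(se) - len(set(se)) != 0:
--         def rec(vs, avail):
--             # permutations p (lex order) with se[p[j]] == vs[j] for each position j
--             if not vs:
--                 return [()]
--             res = []
--             for i in avail:
--                 if se[i] == vs[0]:
--                     for t in rec(vs[1:], [x for x in avail if x != i]):
--                         res.append((i,) + t)
--             return res
--         return rec(list(se), list(range(n)))
--     else:
--         return [se]
-- ===== Notes on version B (the rewrite author's own statement) =====
-- stated objective: faster
-- what changed: Instead of generating all n! index permutations and filtering those that fix the list, B backtracks position by position choosing only unused indices whose value matches, emitting exactly the stabilizer permutations in the same lex order.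
import Mathlib
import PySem

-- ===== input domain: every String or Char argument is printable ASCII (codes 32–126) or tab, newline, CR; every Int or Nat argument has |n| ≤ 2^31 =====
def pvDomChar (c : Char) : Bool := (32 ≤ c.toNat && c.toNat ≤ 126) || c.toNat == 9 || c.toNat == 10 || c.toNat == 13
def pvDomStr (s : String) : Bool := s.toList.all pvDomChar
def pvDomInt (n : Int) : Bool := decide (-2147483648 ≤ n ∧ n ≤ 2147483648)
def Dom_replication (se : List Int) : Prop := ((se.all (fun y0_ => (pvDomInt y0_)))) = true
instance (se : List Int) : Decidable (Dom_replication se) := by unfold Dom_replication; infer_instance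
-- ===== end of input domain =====

-- B replaces A's filter over all n! index permutations by direct backtracking over
-- equal-value positions only (objective: faster, asymptotic).

-- ===== PORT A =====
-- itertools.permutations(l) in lex order: pick each element in turn, permute the rest.
def pvSelections : List Int → List (Int × List Int)
  | [] => []
  | x :: xs => (x, xs) :: (pvSelections xs).map (fun q => (q.1, x :: q.2))

-- fuel = length of the list; hand port of itertools.permutations (exact in that case)
def pvPerms : Nat → List Int → List (List Int)
  | _, [] => [[]]
  | 0, _ :: _ => []
  | f + 1, x :: xs =>
      (pvSelections (x :: xs)).flatMap (fun q => (pvPerms f q.2).map (fun t => q.1 :: t))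

def replication (se : List Int) : List (List Int) :=
  if se.length - (PySem.Set.ofList se).length ≠ 0 then
    let temp := pvPerms se.length (PySem.List.pyRange 0 se.length 1)
    temp.foldl (fun temp1 p =>
      let temp2 := p.foldl (fun acc j => acc ++ [PySem.List.pyGetD se j 0]) []
      if temp2 = se then temp1 ++ [p] else temp1) []
  else
    [se]

-- ===== PORT B =====
-- rec(vs, avail): permutations (lex order) sending position j to an index with value vs[j]
def pvRec (se : List Int) : List Int → List Int → List (List Int)
  | [], _ => [[]]
  | v :: vs, avail =>
      avail.foldl (fun res i =>
        if PySem.List.pyGetD se i 0 = v then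
          res ++ (pvRec se vs (avail.filter (fun x => x ≠ i))).map (fun t => i :: t)
        else res) []

def replication_alt (se : List Int) : List (List Int) :=
  if se.length - (PySem.Set.ofList se).length ≠ 0 then
    pvRec se se (PySem.List.pyRange 0 se.length 1)
  else
    [se]

-- ===== PRECONDITION & SPEC =====
def Spec_replication (se : List Int) (out : List (List Int)) : Prop := out = replication_alt se
instance (se : List Int) (out : List (List Int)) : Decidable (Spec_replication se out) := by unfold Spec_replication; infer_instance

-- ===== CLAIM (what is proved, stated in full; the proofs are below) =====
def Claim_equal_replication : Prop := ∀ (se : List Int), Dom_replication se → Spec_replication se (replication se)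

-- ===== LEMMAS AND PROOFS =====

theorem pv_foldl_append_map (f : Int → Int) :
    ∀ (p : List Int) (acc : List Int),
      p.foldl (fun a j => a ++ [f j]) acc = acc ++ p.map f := by
  intro p
  induction p with
  | nil => intro acc; simp
  | cons x xs ih => intro acc; simp [List.foldl_cons, ih]

theorem pv_foldl_filter (C : List Int → Prop) [DecidablePred C] :
    ∀ (l : List (List Int)) (acc : List (List Int)),
      l.foldl (fun t p => if C p then t ++ [p] else t) acc
        = acc ++ l.filter (fun p => decide (C p)) := by
  intro l
  induction l with
  | nil => intro acc; simp
  | cons x xs ih =>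
      intro acc
      by_cases h : C x <;> simp [List.foldl_cons, h, ih]

theorem pv_foldl_flatMap (g : Int → List (List Int)) :
    ∀ (l : List Int) (acc : List (List Int)),
      l.foldl (fun res i => res ++ g i) acc = acc ++ l.flatMap g := by
  intro l
  induction l with
  | nil => intro acc; simp
  | cons x xs ih => intro acc; simp [List.foldl_cons, ih]

theorem pvRec_cons (se : List Int) (v : Int) (vs avail : List Int) :
    pvRec se (v :: vs) avail
      = avail.flatMap (fun i =>
          if PySem.List.pyGetD se i 0 = v then
            (pvRec se vs (avail.filter (fun x => x ≠ i))).map (fun t => i :: t)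
          else []) := by
  show avail.foldl _ [] = _
  have h : (fun (res : List (List Int)) i =>
        if PySem.List.pyGetD se i 0 = v then
          res ++ (pvRec se vs (avail.filter (fun x => x ≠ i))).map (fun t => i :: t)
        else res)
      = fun res i => res ++ (if PySem.List.pyGetD se i 0 = v then
          (pvRec se vs (avail.filter (fun x => x ≠ i))).map (fun t => i :: t) else []) := by
    funext res i
    by_cases hc : PySem.List.pyGetD se i 0 = v <;> simp [hc]
  rw [h, pv_foldl_flatMap]
  simp

theorem pvSelections_eq_map :
    ∀ (l : List Int), l.Nodup →
      pvSelections l = l.map (fun x => (x, l.filter (fun y => y ≠ x))) := by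
  intro l
  induction l with
  | nil => intro _; rfl
  | cons a as ih =>
      intro hnd
      rcases List.nodup_cons.mp hnd with ⟨ha, hnd'⟩
      have hfa : as.filter (fun y => y ≠ a) = as := by
        apply List.filter_eq_self.mpr
        intro y hy
        simp only [decide_eq_true_eq]
        intro h; exact ha (h ▸ hy)
      simp only [pvSelections, ih hnd', List.map_map, List.map_cons, List.cons.injEq]
      refine ⟨?_, ?_⟩
      · have hfc : List.filter (fun y => decide (y ≠ a)) (a :: as) = as := by
          rw [List.filter_cons_of_neg (by simp), hfa]
        rw [hfc]
      · apply List.map_congr_left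
        intro x hx
        have hax : a ≠ x := fun h => ha (h ▸ hx)
        simp [Function.comp, hax]

theorem pv_filter_length_sub {l : List Int} {x : Int} (hx : x ∈ l) (hnd : l.Nodup) :
    (l.filter (fun y => y ≠ x)).length = l.length - 1 := by
  have hb : (fun y : Int => decide (y ≠ x)) = (fun y => y != x) := by
    funext y; by_cases h : y = x <;> simp [h]
  have h1 : l.filter (fun y => y ≠ x) = l.erase x := by
    rw [show (List.filter (fun y => decide (y ≠ x)) l) = List.filter (fun y => y != x) l from by rw [hb]]
    exact (List.Nodup.erase_eq_filter hnd x).symm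
  rw [h1, List.length_erase_of_mem hx]

theorem pv_key (se : List Int) :
    ∀ (vs avail : List Int), avail.length = vs.length → avail.Nodup →
      (pvPerms avail.length avail).filter
          (fun p => decide (p.map (fun j => PySem.List.pyGetD se j 0) = vs))
        = pvRec se vs avail := by
  intro vs
  induction vs with
  | nil =>
      intro avail hlen _
      have : avail = [] := List.length_eq_zero_iff.mp hlen
      subst this
      simp [pvPerms, pvRec]
  | cons v vs ih =>
      intro avail hlen hnd
      match avail, hlen with
      | a :: as, hlen =>
        have hlen' : as.length = vs.length := by
          simpa using hlen
        rw [pvRec_cons]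
        show (pvPerms (as.length + 1) (a :: as)).filter _ = _
        rw [show pvPerms (as.length + 1) (a :: as)
              = (pvSelections (a :: as)).flatMap
                  (fun q => (pvPerms as.length q.2).map (fun t => q.1 :: t)) from rfl]
        rw [pvSelections_eq_map _ hnd, List.flatMap_map]
        rw [List.filter_flatMap]
        apply List.flatMap_congr
        intro x hx
        have hmem : x ∈ a :: as := hx
        have hflen : ((a :: as).filter (fun y => y ≠ x)).length = as.length := by
          rw [pv_filter_length_sub hmem hnd]; simp
        have hfnd : ((a :: as).filter (fun y => y ≠ x)).Nodup := List.Nodup.filter _ hnd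
        rw [List.filter_map]
        by_cases hv : PySem.List.pyGetD se x 0 = v
        · have hpred : ((fun p => decide (p.map (fun j => PySem.List.pyGetD se j 0) = v :: vs))
              ∘ (fun t => x :: t)) = fun t => decide (t.map (fun j => PySem.List.pyGetD se j 0) = vs) := by
            funext t
            simp [Function.comp, hv]
          rw [hpred, if_pos hv]
          have h2 := ih _ (hflen.trans hlen') hfnd
          rw [hflen] at h2
          rw [h2]
        · rw [if_neg hv]
          have h0 : ((pvPerms as.length ((a :: as).filter (fun y => y ≠ x))).filter
              ((fun p => decide (p.map (fun j => PySem.List.pyGetD se j 0) = v :: vs))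
                ∘ (fun t => x :: t))) = [] := by
            apply List.filter_eq_nil_iff.mpr
            intro t ht
            simp [Function.comp, hv]
          rw [h0, List.map_nil]

theorem replication_eq (se : List Int) : replication se = replication_alt se := by
  unfold replication replication_alt
  by_cases hc : se.length - (PySem.Set.ofList se).length ≠ 0
  · rw [if_pos hc, if_pos hc]
    have hlen : (PySem.List.pyRange 0 (se.length : Int) 1).length = se.length := by
      simp [PySem.List.length_pyRange_one]
    have hnd : (PySem.List.pyRange 0 (se.length : Int) 1).Nodup :=
      PySem.List.nodup_pyRange_one _ _
    have hkey := pv_key se se (PySem.List.pyRange 0 (se.length : Int) 1)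
      (by rw [hlen]) hnd
    rw [hlen] at hkey
    calc (pvPerms se.length (PySem.List.pyRange 0 (se.length : Int) 1)).foldl
            (fun temp1 p =>
              if p.foldl (fun acc j => acc ++ [PySem.List.pyGetD se j 0]) [] = se
              then temp1 ++ [p] else temp1) []
        = (pvPerms se.length (PySem.List.pyRange 0 (se.length : Int) 1)).filter
            (fun p => decide (p.map (fun j => PySem.List.pyGetD se j 0) = se)) := by
          have hfn : (fun (temp1 : List (List Int)) (p : List Int) =>
              if p.foldl (fun acc j => acc ++ [PySem.List.pyGetD se j 0]) [] = se
              then temp1 ++ [p] else temp1)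
            = fun temp1 p =>
              if p.map (fun j => PySem.List.pyGetD se j 0) = se
              then temp1 ++ [p] else temp1 := by
            funext temp1 p
            rw [pv_foldl_append_map]
            simp
          rw [hfn, pv_foldl_filter (fun p => p.map (fun j => PySem.List.pyGetD se j 0) = se)]
          simp
      _ = pvRec se se (PySem.List.pyRange 0 (se.length : Int) 1) := hkey
  · rw [if_neg hc, if_neg hc]

-- ===== VERDICT (by name: the statement is the Claim_ definition above) =====
theorem replication_spec : Claim_equal_replication := by
  intro se _
  unfold Spec_replication
  exact replication_eq se
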